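-- pv_equiv track=rewrite | github.com/GabrielDuta/Overtake_manuver | examples/overtake/create_csv.py | replace_commas_with_newlines
-- ===== SOURCE A (Python) =====
-- def replace_commas_with_newlines(content):
--     lines = []
--     current_line = ""
--     comma_count = 0
--
--     for char in content:
--         if char == ',':
--             comma_count += 1
--             if comma_count % 4 == 0:
--                 lines.append(current_line.strip())
--                 current_line = ""
--             else:
--                 current_line += char
--         else:
--             current_line += char
--
--     # Add the last line if it's not empty
--     if current_line.strip():
--         lines.append(current_line.strip())
--
--     return "\n".join(lines)
-- ===== SOURCE B (Python) =====
-- def replace_commas_with_newlines(content):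
--     parts = content.split(',')
--     m = (len(parts) - 1) // 4
--     lines = [','.join(parts[4*i:4*i+4]).strip() for i in range(m)]
--     trailing = ','.join(parts[4*m:]).strip()
--     if trailing:
--         lines.append(trailing)
--     return "\n".join(lines)
-- ===== Notes on version B (the rewrite author's own statement) =====
-- stated objective: simpler
-- what changed: Replaced A's character-by-character scan with a comma counter and per-character string accumulation by a single split-on-comma pass that regroups the parts in fours and joins each group back.
import Mathlib
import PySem

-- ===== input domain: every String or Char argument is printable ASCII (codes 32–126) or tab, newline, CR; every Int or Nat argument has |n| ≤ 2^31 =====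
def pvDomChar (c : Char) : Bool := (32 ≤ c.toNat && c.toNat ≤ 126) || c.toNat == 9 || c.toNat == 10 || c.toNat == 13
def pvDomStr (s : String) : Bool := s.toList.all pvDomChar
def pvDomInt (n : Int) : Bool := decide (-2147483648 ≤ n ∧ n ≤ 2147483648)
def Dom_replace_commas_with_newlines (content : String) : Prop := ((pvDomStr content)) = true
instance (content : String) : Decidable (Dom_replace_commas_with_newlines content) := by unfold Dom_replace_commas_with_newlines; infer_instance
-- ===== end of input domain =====

-- B replaces A's char-by-char comma-counting scan with a split-on-comma, regroup-in-fours pass (objective: simpler).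

-- ===== PORT A =====
-- loop body of A's `for char in content` (state: lines, current_line, comma_count)
def pvStepA (st : List (List Char) × List Char × Nat) (c : Char) : List (List Char) × List Char × Nat :=
  if c = ',' then
    if (st.2.2 + 1) % 4 = 0 then (st.1 ++ [PySem.Chars.strip st.2.1], [], st.2.2 + 1)
    else (st.1, st.2.1 ++ [c], st.2.2 + 1)
  else (st.1, st.2.1 ++ [c], st.2.2)

def replace_commas_with_newlines (content : String) : String :=
  let st := content.toList.foldl pvStepA ([], [], 0)
  let lines := if PySem.Chars.strip st.2.1 ≠ [] then st.1 ++ [PySem.Chars.strip st.2.1] else st.1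
  String.mk (PySem.Chars.join ['\n'] lines)

-- ===== PORT B =====
-- body of B after `parts = content.split(',')`: regroup the parts in fours
def pvAltLines (parts : List (List Char)) : List (List Char) :=
  let m := (parts.length - 1) / 4
  let lines := (List.range m).map (fun i =>
    PySem.Chars.strip (PySem.Chars.join [','] (PySem.List.slice parts (some ((4*i : Nat) : Int)) (some ((4*i+4 : Nat) : Int)))))
  let trailing := PySem.Chars.strip (PySem.Chars.join [','] (PySem.List.slice parts (some ((4*m : Nat) : Int)) none))
  if trailing ≠ [] then lines ++ [trailing] else lines

def replace_commas_with_newlines_alt (content : String) : String :=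
  String.mk (PySem.Chars.join ['\n'] (pvAltLines (PySem.Chars.splitOn content.toList [','])))

-- ===== PRECONDITION & SPEC =====
def Spec_replace_commas_with_newlines (content : String) (out : String) : Prop := out = replace_commas_with_newlines_alt content
instance (content : String) (out : String) : Decidable (Spec_replace_commas_with_newlines content out) := by unfold Spec_replace_commas_with_newlines; infer_instance

-- ===== CLAIM (what is proved, stated in full; the proofs are below) =====
def Claim_equal_replace_commas_with_newlines : Prop := ∀ (content : String), Dom_replace_commas_with_newlines content → Spec_replace_commas_with_newlines content (replace_commas_with_newlines content)

-- ===== LEMMAS AND PROOFS =====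

-- splitting on a single comma, structurally
def pvSplitC : List Char → List (List Char)
  | [] => [[]]
  | c :: rest =>
    if c = ',' then [] :: pvSplitC rest
    else
      match pvSplitC rest with
      | [] => [[c]]
      | p :: ps => (c :: p) :: ps

def pvConsHd (pre : List Char) : List (List Char) → List (List Char)
  | [] => [pre]
  | p :: ps => (pre ++ p) :: ps

def pvFlat (ps : List (List Char)) : List Char := (ps.map (fun p => ',' :: p)).flatten

-- the common grouping both programs compute: current part `cur`, remaining parts `ps`
def pvChunks : List Char → List (List Char) → List (List Char)
  | cur, p1 :: p2 :: p3 :: p4 :: rest =>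
      PySem.Chars.strip (PySem.Chars.join [','] [cur, p1, p2, p3]) :: pvChunks p4 rest
  | cur, ps =>
      let t := PySem.Chars.strip (PySem.Chars.join [','] (cur :: ps))
      if t ≠ [] then [t] else []

def pvFinish (st : List (List Char) × List Char × Nat) : List (List Char) :=
  if PySem.Chars.strip st.2.1 ≠ [] then st.1 ++ [PySem.Chars.strip st.2.1] else st.1

lemma pvSplitC_ne_nil (s : List Char) : pvSplitC s ≠ [] := by
  cases s with
  | nil => simp [pvSplitC]
  | cons c rest =>
    simp only [pvSplitC]
    split
    · simp
    · cases h : pvSplitC rest <;> simp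

lemma pvGo_eq (fuel : Nat) : ∀ (l cur : List Char) (acc : List (List Char)), l.length < fuel →
    PySem.Chars.splitOn.go [','] fuel l cur acc = acc.reverse ++ pvConsHd cur.reverse (pvSplitC l) := by
  induction fuel with
  | zero => intro l cur acc h; omega
  | succ n ih =>
    intro l cur acc h
    cases l with
    | nil =>
      simp [PySem.Chars.splitOn.go, pvSplitC, pvConsHd]
    | cons c rest =>
      rw [PySem.Chars.splitOn.go]
      by_cases hc : c = ','
      · subst hc
        simp only [List.isPrefixOf, BEq.rfl, Bool.and_self, if_true, List.length_cons,
          List.length_nil, List.drop_succ_cons, List.drop_zero]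
        rw [ih rest [] _ (by simpa using Nat.lt_of_succ_lt_succ h)]
        cases hh : pvSplitC rest with
        | nil => exact absurd hh (pvSplitC_ne_nil rest)
        | cons q qs => simp [pvSplitC, hh, pvConsHd]
      · have hpre : [','].isPrefixOf (c :: rest) = false := by
          simp [List.isPrefixOf]
          exact fun h' => hc h'.symm
        rw [hpre]
        simp only [Bool.false_eq_true, if_false]
        rw [ih rest (c :: cur) acc (by simpa using Nat.lt_of_succ_lt_succ h)]
        cases hh : pvSplitC rest with
        | nil => exact absurd hh (pvSplitC_ne_nil rest)
        | cons q qs => simp [pvSplitC, hc, hh, pvConsHd]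

lemma pvSplitOn_comma (s : List Char) : PySem.Chars.splitOn s [','] = pvSplitC s := by
  unfold PySem.Chars.splitOn
  rw [pvGo_eq (s.length + 1) s [] [] (by omega)]
  cases h : pvSplitC s with
  | nil => exact absurd h (pvSplitC_ne_nil s)
  | cons p ps => simp [pvConsHd]

lemma pvFlat_cons (p : List Char) (ps : List (List Char)) :
    pvFlat (p :: ps) = ',' :: (p ++ pvFlat ps) := by
  simp [pvFlat]

lemma pvSplitC_recon : ∀ (s : List Char) (p : List Char) (ps : List (List Char)),
    pvSplitC s = p :: ps → p ++ pvFlat ps = s := by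
  intro s
  induction s with
  | nil =>
    intro p ps h
    simp only [pvSplitC, List.cons.injEq] at h
    rw [← h.1, ← h.2]
    simp [pvFlat]
  | cons c rest ih =>
    intro p ps h
    by_cases hc : c = ','
    · subst hc
      cases hh : pvSplitC rest with
      | nil => exact absurd hh (pvSplitC_ne_nil rest)
      | cons q qs =>
        simp only [pvSplitC, hh] at h
        injection h with h1 h2
        rw [← h1, ← h2, pvFlat_cons]
        simp [ih q qs hh]
    · simp only [pvSplitC, if_neg hc] at h
      cases hh : pvSplitC rest with
      | nil => exact absurd hh (pvSplitC_ne_nil rest)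
      | cons q qs =>
        rw [hh] at h
        simp only [List.cons.injEq] at h
        rw [← h.1, ← h.2]
        have := ih q qs hh
        simp [this]

lemma pvSplitC_no_comma : ∀ (s : List Char) (p : List Char), p ∈ pvSplitC s → ',' ∉ p := by
  intro s
  induction s with
  | nil => intro p hp; simp [pvSplitC] at hp; simp [hp]
  | cons c rest ih =>
    intro p hp
    by_cases hc : c = ','
    · subst hc
      simp [pvSplitC] at hp
      rcases hp with rfl | hp
      · simp
      · exact ih p hp
    · simp only [pvSplitC, if_neg hc] at hp
      cases hh : pvSplitC rest with
      | nil => exact absurd hh (pvSplitC_ne_nil rest)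
      | cons q qs =>
        rw [hh] at hp
        simp only [List.mem_cons] at hp
        rcases hp with rfl | hp
        · intro hm
          rcases List.mem_cons.mp hm with h1 | h2
          · exact hc h1.symm
          · exact ih q (hh ▸ List.mem_cons_self ..) h2
        · exact ih p (hh ▸ List.mem_cons_of_mem _ hp)

lemma pvStepA_comma_keep (lines : List (List Char)) (cur : List Char) (cnt : Nat)
    (h : (cnt + 1) % 4 ≠ 0) : pvStepA (lines, cur, cnt) ',' = (lines, cur ++ [','], cnt + 1) := by
  simp [pvStepA, h]

lemma pvStepA_comma_break (lines : List (List Char)) (cur : List Char) (cnt : Nat)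
    (h : (cnt + 1) % 4 = 0) :
    pvStepA (lines, cur, cnt) ',' = (lines ++ [PySem.Chars.strip cur], [], cnt + 1) := by
  simp [pvStepA, h]

lemma pvFoldl_no_comma : ∀ (xs : List Char), ',' ∉ xs → ∀ (lines : List (List Char)) (cur : List Char) (cnt : Nat),
    List.foldl pvStepA (lines, cur, cnt) xs = (lines, cur ++ xs, cnt) := by
  intro xs
  induction xs with
  | nil => intro _ lines cur cnt; simp
  | cons c rest ih =>
    intro h lines cur cnt
    simp only [List.mem_cons, not_or] at h
    simp only [List.foldl_cons, pvStepA, if_neg (Ne.symm h.1)]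
    rw [ih h.2]
    simp

lemma pvFoldl_keep (lines : List (List Char)) (cur p ys : List Char) (cnt : Nat)
    (h : (cnt + 1) % 4 ≠ 0) (hp : ',' ∉ p) :
    List.foldl pvStepA (lines, cur, cnt) (',' :: (p ++ ys)) =
      List.foldl pvStepA (lines, cur ++ ',' :: p, cnt + 1) ys := by
  simp only [List.foldl_cons, pvStepA_comma_keep _ _ _ h]
  rw [List.foldl_append, pvFoldl_no_comma p hp]
  simp

lemma pvFoldl_break (lines : List (List Char)) (cur p ys : List Char) (cnt : Nat)
    (h : (cnt + 1) % 4 = 0) (hp : ',' ∉ p) :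
    List.foldl pvStepA (lines, cur, cnt) (',' :: (p ++ ys)) =
      List.foldl pvStepA (lines ++ [PySem.Chars.strip cur], p, cnt + 1) ys := by
  simp only [List.foldl_cons, pvStepA_comma_break _ _ _ h]
  rw [List.foldl_append, pvFoldl_no_comma p hp]
  simp

lemma pvJoin_cons (a : List Char) (b : List Char) (t : List (List Char)) :
    PySem.Chars.join [','] (a :: b :: t) = a ++ ',' :: PySem.Chars.join [','] (b :: t) := by
  simp [PySem.Chars.join, List.intercalate, List.intersperse]

lemma pvJoin_single (a : List Char) : PySem.Chars.join [','] [a] = a := by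
  simp [PySem.Chars.join, List.intercalate]

lemma pvChunks_small (cur : List Char) (ps : List (List Char)) (h : ps.length ≤ 3) :
    pvChunks cur ps =
      (if PySem.Chars.strip (PySem.Chars.join [','] (cur :: ps)) ≠ []
       then [PySem.Chars.strip (PySem.Chars.join [','] (cur :: ps))] else []) := by
  rcases ps with _ | ⟨p1, _ | ⟨p2, _ | ⟨p3, _ | ⟨p4, rest⟩⟩⟩⟩
  · simp [pvChunks]
  · simp [pvChunks]
  · simp [pvChunks]
  · simp [pvChunks]
  · exfalso; simp at h; omega

lemma pvFoldlA_base (cur : List Char) (ps : List (List Char)) (h3 : ps.length ≤ 3)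
    (hps : ∀ p ∈ ps, ',' ∉ p) (lines : List (List Char)) (q : Nat) :
    pvFinish (List.foldl pvStepA (lines, cur, 4*q) (pvFlat ps)) =
      lines ++ (if PySem.Chars.strip (PySem.Chars.join [','] (cur :: ps)) ≠ []
                then [PySem.Chars.strip (PySem.Chars.join [','] (cur :: ps))] else []) := by
  rcases ps with _ | ⟨p1, _ | ⟨p2, _ | ⟨p3, _ | ⟨p4, rest⟩⟩⟩⟩
  · simp [pvFlat, pvFinish]
    split <;> simp
  · rw [pvFlat_cons, pvFoldl_keep _ _ _ _ _ (by omega) (hps p1 (by simp))]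
    simp only [pvFlat, List.map_nil, List.flatten_nil, List.foldl_nil]
    rw [pvJoin_cons, pvJoin_single]
    simp [pvFinish]
    split <;> simp
  · rw [pvFlat_cons, pvFoldl_keep _ _ _ _ _ (by omega) (hps p1 (by simp)),
        pvFlat_cons, pvFoldl_keep _ _ _ _ _ (by omega) (hps p2 (by simp))]
    simp only [pvFlat, List.map_nil, List.flatten_nil, List.foldl_nil]
    rw [pvJoin_cons, pvJoin_cons, pvJoin_single]
    simp [pvFinish]
    split <;> simp
  · rw [pvFlat_cons, pvFoldl_keep _ _ _ _ _ (by omega) (hps p1 (by simp)),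
        pvFlat_cons, pvFoldl_keep _ _ _ _ _ (by omega) (hps p2 (by simp)),
        pvFlat_cons, pvFoldl_keep _ _ _ _ _ (by omega) (hps p3 (by simp))]
    simp only [pvFlat, List.map_nil, List.flatten_nil, List.foldl_nil]
    rw [pvJoin_cons, pvJoin_cons, pvJoin_cons, pvJoin_single]
    simp [pvFinish]
    split <;> simp
  · exfalso; simp at h3; omega

lemma pvFoldlA_chunks (ps : List (List Char)) (cur : List Char) :
    ∀ (lines : List (List Char)) (q : Nat), (∀ p ∈ ps, ',' ∉ p) →
    pvFinish (List.foldl pvStepA (lines, cur, 4*q) (pvFlat ps)) = lines ++ pvChunks cur ps := by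
  induction cur, ps using pvChunks.induct with
  | case1 cur p1 p2 p3 p4 rest ih =>
    intro lines q hps
    rw [pvFlat_cons, pvFoldl_keep _ _ _ _ _ (by omega) (hps p1 (by simp)),
        pvFlat_cons, pvFoldl_keep _ _ _ _ _ (by omega) (hps p2 (by simp)),
        pvFlat_cons, pvFoldl_keep _ _ _ _ _ (by omega) (hps p3 (by simp)),
        pvFlat_cons, pvFoldl_break _ _ _ _ _ (by omega) (hps p4 (by simp))]
    rw [show (4*q + 1 + 1 + 1 + 1) = 4*(q+1) by ring]
    rw [ih _ (q+1) (fun p hp => hps p (by simp [hp]))]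
    simp only [pvChunks]
    rw [pvJoin_cons, pvJoin_cons, pvJoin_cons, pvJoin_single]
    simp [List.append_assoc]
  | case2 cur ps hne _ _ =>
    intro lines q hps
    have h3 : ps.length ≤ 3 := by
      rcases ps with _ | ⟨p1, _ | ⟨p2, _ | ⟨p3, _ | ⟨p4, rest⟩⟩⟩⟩ <;> simp
      exact absurd rfl (fun h => hne p1 p2 p3 p4 rest h)
    rw [pvFoldlA_base cur ps h3 hps lines q, pvChunks_small cur ps h3]
  | case3 cur ps hne _ _ =>
    intro lines q hps
    have h3 : ps.length ≤ 3 := by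
      rcases ps with _ | ⟨p1, _ | ⟨p2, _ | ⟨p3, _ | ⟨p4, rest⟩⟩⟩⟩ <;> simp
      exact absurd rfl (fun h => hne p1 p2 p3 p4 rest h)
    rw [pvFoldlA_base cur ps h3 hps lines q, pvChunks_small cur ps h3]

lemma pvAlt_small (cur : List Char) (ps : List (List Char)) (h3 : ps.length ≤ 3) :
    pvAltLines (cur :: ps) =
      (if PySem.Chars.strip (PySem.Chars.join [','] (cur :: ps)) ≠ []
       then [PySem.Chars.strip (PySem.Chars.join [','] (cur :: ps))] else []) := by
  have hm : ((cur :: ps).length - 1) / 4 = 0 := by simp; omega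
  simp only [pvAltLines, hm, List.range_zero, List.map_nil, Nat.mul_zero, Nat.cast_zero,
    PySem.List.slice_zero_start, PySem.List.slice_none_none]
  split <;> simp

lemma pvAlt_chunks (ps : List (List Char)) (cur : List Char) :
    pvAltLines (cur :: ps) = pvChunks cur ps := by
  induction cur, ps using pvChunks.induct with
  | case1 cur p1 p2 p3 p4 rest ih =>
    have hm : ((cur :: p1 :: p2 :: p3 :: p4 :: rest).length - 1) / 4 = rest.length / 4 + 1 := by
      simp; omega
    have hm' : ((p4 :: rest).length - 1) / 4 = rest.length / 4 := by simp
    simp only [pvAltLines, hm]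
    rw [List.range_succ_eq_map]
    simp only [List.map_cons, List.map_map]
    rw [show (4*(rest.length/4 + 1)) = 4*(rest.length/4) + 4 by ring]
    -- head chunk
    have hhead : PySem.List.slice (cur :: p1 :: p2 :: p3 :: p4 :: rest)
        (some ((4*0 : Nat) : Int)) (some ((4*0+4 : Nat) : Int)) = [cur, p1, p2, p3] := by
      rw [PySem.List.slice_natCast]
      simp
    -- shifted chunks
    have hshift : ∀ i : Nat, PySem.List.slice (cur :: p1 :: p2 :: p3 :: p4 :: rest)
        (some ((4*(i+1) : Nat) : Int)) (some ((4*(i+1)+4 : Nat) : Int)) =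
        PySem.List.slice (p4 :: rest) (some ((4*i : Nat) : Int)) (some ((4*i+4 : Nat) : Int)) := by
      intro i
      rw [PySem.List.slice_natCast, PySem.List.slice_natCast,
          show 4*(i+1)+4 - 4*(i+1) = 4 by omega, show 4*i+4 - 4*i = 4 by omega,
          show 4*(i+1) = 4 + 4*i by ring, ← List.drop_drop]
      rfl
    -- trailing
    have htrail : PySem.List.slice (cur :: p1 :: p2 :: p3 :: p4 :: rest)
        (some ((4*(rest.length/4) + 4 : Nat) : Int)) none =
        PySem.List.slice (p4 :: rest) (some ((4*(rest.length/4) : Nat) : Int)) none := by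
      rw [PySem.List.slice_from_natCast, PySem.List.slice_from_natCast,
          show 4*(rest.length/4) + 4 = 4 + 4*(rest.length/4) by ring, ← List.drop_drop]
      rfl
    rw [hhead, htrail]
    have hmapeq : List.map
        ((fun i => PySem.Chars.strip (PySem.Chars.join [','] (PySem.List.slice (cur :: p1 :: p2 :: p3 :: p4 :: rest) (some ((4*i : Nat) : Int)) (some ((4*i+4 : Nat) : Int))))) ∘ (· + 1))
        (List.range (rest.length/4)) =
        List.map (fun i => PySem.Chars.strip (PySem.Chars.join [','] (PySem.List.slice (p4 :: rest) (some ((4*i : Nat) : Int)) (some ((4*i+4 : Nat) : Int)))))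
        (List.range (rest.length/4)) := by
      apply List.map_congr_left
      intro i _
      simp only [Function.comp]
      rw [hshift i]
    rw [hmapeq]
    simp only [pvChunks]
    rw [← ih]
    simp only [pvAltLines, hm']
    split <;> simp
  | case2 cur ps hne _ _ =>
    have h3 : ps.length ≤ 3 := by
      rcases ps with _ | ⟨p1, _ | ⟨p2, _ | ⟨p3, _ | ⟨p4, rest⟩⟩⟩⟩ <;> simp
      exact absurd rfl (fun h => hne p1 p2 p3 p4 rest h)
    rw [pvAlt_small cur ps h3, pvChunks_small cur ps h3]
  | case3 cur ps hne _ _ =>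
    have h3 : ps.length ≤ 3 := by
      rcases ps with _ | ⟨p1, _ | ⟨p2, _ | ⟨p3, _ | ⟨p4, rest⟩⟩⟩⟩ <;> simp
      exact absurd rfl (fun h => hne p1 p2 p3 p4 rest h)
    rw [pvAlt_small cur ps h3, pvChunks_small cur ps h3]

-- ===== VERDICT (by name: the statement is the Claim_ definition above) =====
theorem replace_commas_with_newlines_spec : Claim_equal_replace_commas_with_newlines := by
  intro content _
  unfold Spec_replace_commas_with_newlines replace_commas_with_newlines replace_commas_with_newlines_alt
  rw [pvSplitOn_comma]
  cases h : pvSplitC content.toList with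
  | nil => exact absurd h (pvSplitC_ne_nil _)
  | cons p0 ps =>
    have hrec := pvSplitC_recon content.toList p0 ps h
    have hnc : ∀ p ∈ ps, ',' ∉ p := fun p hp => pvSplitC_no_comma content.toList p (h ▸ List.mem_cons_of_mem _ hp)
    have hnc0 : ',' ∉ p0 := pvSplitC_no_comma content.toList p0 (h ▸ List.mem_cons_self ..)
    have hA : content.toList.foldl pvStepA ([], [], 0) = List.foldl pvStepA ([], p0, 0) (pvFlat ps) := by
      rw [← hrec, List.foldl_append, pvFoldl_no_comma p0 hnc0]
      simp
    rw [pvAlt_chunks ps p0]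
    simp only [hA]
    have hmain := pvFoldlA_chunks ps p0 [] 0 hnc
    rw [show (4*0 : Nat) = 0 from rfl] at hmain
    unfold pvFinish at hmain
    simp only [hmain]
    simp
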